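-- pv_equiv track=rewrite | github.com/alyona-sazhina/2019-2-level-labs | lab_4/main.py | clean_tokenize_corpus
-- ===== SOURCE A (Python) =====
-- def clean_tokenize_corpus(texts: list) -> list:
--     if not texts or not isinstance(texts, list):
--         return []
--     clean_token_corpus = []
--     for one_text in texts:
--         if not isinstance(one_text, str):
--             continue
--         while '<br />' in one_text:
--             one_text = one_text.replace("<br />", " ")
--         new_text = ''
--         for symbol in one_text:
--             if symbol.isalpha() or symbol == ' ':
--                 new_text += symbol
--         new_text = new_text.lower()
--         corpus1 = new_text.split(' ')
--         corpus = []
--         for word in corpus1: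
--             if word != '':
--                 corpus.append(word)
--         clean_token_corpus.append(corpus)
--     return clean_token_corpus
-- ===== SOURCE B (Python) =====
-- def clean_tokenize_corpus(texts: list) -> list:
--     if not texts or not isinstance(texts, list):
--         return []
--     result = []
--     for one_text in texts:
--         if not isinstance(one_text, str):
--             continue
--         while '<br />' in one_text:
--             one_text = one_text.replace("<br />", " ")
--         one_text = one_text.lower()
--         words = []
--         current = ''
--         for ch in one_text:
--             if ch.isalpha():
--                 current += ch
--             elif ch == ' ':
--                 if current:
--                     words.append(current)
--                     current = ''
--             # any other character is deleted, joining its neighbours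
--         if current:
--             words.append(current)
--         result.append(words)
--     return result
-- ===== Notes on version B (the rewrite author's own statement) =====
-- stated objective: alternative
-- what changed: A cleans each text in four passes (character-filter loop building a new string, lower(), split(' '), a loop dropping empty chunks); B lowercases once and then makes a single left-to-right pass with a current-word buffer that appends alphabetic chars, flushes on space, and deletes other characters.
import Mathlib
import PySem

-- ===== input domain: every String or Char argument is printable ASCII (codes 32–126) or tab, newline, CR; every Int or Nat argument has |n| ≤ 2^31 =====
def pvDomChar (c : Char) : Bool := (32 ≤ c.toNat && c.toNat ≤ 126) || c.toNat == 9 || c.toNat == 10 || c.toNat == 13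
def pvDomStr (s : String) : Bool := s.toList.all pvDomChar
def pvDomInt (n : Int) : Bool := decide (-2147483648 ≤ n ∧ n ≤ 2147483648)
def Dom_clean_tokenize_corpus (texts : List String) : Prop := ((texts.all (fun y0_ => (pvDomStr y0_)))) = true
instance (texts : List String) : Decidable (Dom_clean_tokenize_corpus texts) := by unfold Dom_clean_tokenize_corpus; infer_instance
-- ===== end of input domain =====

-- B replaces A's four passes per text (filter chars, lower, split(' '), drop empties) by one
-- left-to-right scan with a current-word buffer; same return value (alternative decomposition).

-- shared helper: both Pythons contain the identical `while '<br />' in t: t = t.replace("<br />", " ")`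
-- loop; fuel (length + 1) is generous since every executed replace shortens the string.
def brPat : List Char := ['<', 'b', 'r', ' ', '/', '>']

def brFix : Nat → List Char → List Char
  | 0, s => s
  | fuel + 1, s =>
    if PySem.Chars.isIn brPat s then brFix fuel (PySem.Chars.replace s brPat [' ']) else s

-- ===== PORT A =====
def clean_tokenize_corpus (texts : List String) : List (List String) :=
  if texts = [] then []
  else
    texts.foldl (fun clean_token_corpus one_text =>
      let s := brFix (one_text.toList.length + 1) one_text.toList
      let new_text := s.foldl (fun nt symbol =>
        if PySem.Chars.isalpha symbol || symbol == ' ' then nt ++ [symbol] else nt) []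
      let new_text := PySem.Chars.lower new_text
      let corpus1 := PySem.Chars.splitOn new_text [' ']
      let corpus := corpus1.foldl (fun corpus word =>
        if word != [] then corpus ++ [word] else corpus) []
      clean_token_corpus ++ [corpus.map String.ofList]) []

-- ===== PORT B =====
def clean_tokenize_corpus_alt (texts : List String) : List (List String) :=
  if texts = [] then []
  else
    texts.foldl (fun result one_text =>
      let t := PySem.Chars.lower (brFix (one_text.toList.length + 1) one_text.toList)
      let st := t.foldl (fun (st : List (List Char) × List Char) ch =>
        if PySem.Chars.isalpha ch then (st.1, st.2 ++ [ch])
        else if ch == ' ' then (if st.2 != [] then (st.1 ++ [st.2], []) else st)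
        else st) ([], [])
      let words := if st.2 != [] then st.1 ++ [st.2] else st.1
      result ++ [words.map String.ofList]) []

-- ===== PRECONDITION & SPEC =====
def Spec_clean_tokenize_corpus (texts : List String) (out : List (List String)) : Prop := out = clean_tokenize_corpus_alt texts
instance (texts : List String) (out : List (List String)) : Decidable (Spec_clean_tokenize_corpus texts out) := by unfold Spec_clean_tokenize_corpus; infer_instance

-- ===== CLAIM (what is proved, stated in full; the proofs are below) =====
def Claim_equal_clean_tokenize_corpus : Prop := ∀ (texts : List String), Dom_clean_tokenize_corpus texts → Spec_clean_tokenize_corpus texts (clean_tokenize_corpus texts)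

-- ===== LEMMAS AND PROOFS =====

-- reference splitter: (first chunk, remaining chunks) of splitting on ' '
def splitSp : List Char → List Char × List (List Char)
  | [] => ([], [])
  | c :: rest =>
    let r := splitSp rest
    if c = ' ' then ([], r.1 :: r.2) else (c :: r.1, r.2)

def keepChar (c : Char) : Bool := PySem.Chars.isalpha c || c == ' '

theorem splitOn_go_space (l : List Char) : ∀ (fuel : Nat) (cur : List Char) (acc : List (List Char)),
    l.length ≤ fuel →
    PySem.Chars.splitOn.go [' '] fuel l cur acc
      = acc.reverse ++ ((cur.reverse ++ (splitSp l).1) :: (splitSp l).2) := by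
  induction l with
  | nil =>
    intro fuel cur acc _
    cases fuel <;> simp [PySem.Chars.splitOn.go, splitSp]
  | cons c rest ih =>
    intro fuel cur acc hf
    cases fuel with
    | zero => simp at hf
    | succ f =>
      by_cases hc : c = ' '
      · subst hc
        rw [show PySem.Chars.splitOn.go [' '] (f + 1) (' ' :: rest) cur acc
              = PySem.Chars.splitOn.go [' '] f rest [] (cur.reverse :: acc) by
            simp [PySem.Chars.splitOn.go, List.isPrefixOf]]
        rw [ih f [] (cur.reverse :: acc) (by simpa using hf)]
        simp [splitSp]
      · rw [show PySem.Chars.splitOn.go [' '] (f + 1) (c :: rest) cur acc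
              = PySem.Chars.splitOn.go [' '] f rest (c :: cur) acc by
            simp [PySem.Chars.splitOn.go, List.isPrefixOf, Ne.symm hc]]
        rw [ih f (c :: cur) acc (by simpa using hf)]
        simp [splitSp, hc]

theorem splitOn_space (m : List Char) :
    PySem.Chars.splitOn m [' '] = (splitSp m).1 :: (splitSp m).2 := by
  unfold PySem.Chars.splitOn
  rw [splitOn_go_space m (m.length + 1) [] [] (by omega)]
  simp

def stepB (st : List (List Char) × List Char) (ch : Char) : List (List Char) × List Char :=
  if PySem.Chars.isalpha ch then (st.1, st.2 ++ [ch])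
  else if ch == ' ' then (if st.2 != [] then (st.1 ++ [st.2], []) else st)
  else st

def flushB (st : List (List Char) × List Char) : List (List Char) :=
  if st.2 != [] then st.1 ++ [st.2] else st.1

theorem isalpha_lowerChar (c : Char) :
    PySem.Chars.isalpha (PySem.Chars.lowerChar c) = PySem.Chars.isalpha c := by
  unfold PySem.Chars.lowerChar
  by_cases h : PySem.Chars.isupper c = true
  · have hb : 65 ≤ c.toNat ∧ c.toNat ≤ 90 := by
      unfold PySem.Chars.isupper at h
      simp [Char.le_def, UInt32.le_iff_toNat_le] at h
      exact ⟨h.1, h.2⟩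
    have hA : PySem.Chars.isalpha c = true := by
      unfold PySem.Chars.isalpha; simp [h]
    rw [if_pos h, hA]
    obtain ⟨h1, h2⟩ := hb
    set n := c.toNat with hn
    interval_cases n <;> decide
  · simp [h]

theorem lowerChar_space (c : Char) :
    (PySem.Chars.lowerChar c == ' ') = (c == ' ') := by
  unfold PySem.Chars.lowerChar
  by_cases h : PySem.Chars.isupper c = true
  · have hb : 65 ≤ c.toNat ∧ c.toNat ≤ 90 := by
      unfold PySem.Chars.isupper at h
      simp [Char.le_def, UInt32.le_iff_toNat_le] at h
      exact ⟨h.1, h.2⟩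
    obtain ⟨h1, h2⟩ := hb
    rw [if_pos h]
    have hcne : (c == ' ') = false := by
      cases hq : c == ' '
      · rfl
      · have := beq_iff_eq.mp hq; subst this; exact absurd h1 (by decide)
    rw [hcne]
    set n := c.toNat with hn
    interval_cases n <;> decide
  · simp [h]

theorem keepChar_lowerChar (c : Char) : keepChar (PySem.Chars.lowerChar c) = keepChar c := by
  unfold keepChar
  rw [isalpha_lowerChar, lowerChar_space]

theorem filter_keep_lower (m : List Char) :
    (PySem.Chars.lower m).filter keepChar = PySem.Chars.lower (m.filter keepChar) := by
  unfold PySem.Chars.lower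
  rw [List.filter_map]
  congr 1
  apply List.filter_congr
  intro c _
  simp [Function.comp, keepChar_lowerChar]

theorem isalpha_ne_space {c : Char} (h : PySem.Chars.isalpha c = true) : c ≠ ' ' := by
  intro hc; subst hc; simp [PySem.Chars.isalpha, PySem.Chars.isupper, PySem.Chars.islower] at h

-- the single-pass machine of B computes exactly "split the keepChar-filtered text on ' ',
-- drop empty chunks", appended after the words already emitted
theorem machine_spec (m : List Char) : ∀ (words : List (List Char)) (cur : List Char),
    flushB (m.foldl stepB (words, cur))
      = words ++ ((cur ++ (splitSp (m.filter keepChar)).1) :: (splitSp (m.filter keepChar)).2).filter (· != []) := by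
  induction m with
  | nil =>
    intro words cur
    by_cases h : cur = [] <;> simp [h, splitSp, flushB]
  | cons c rest ih =>
    intro words cur
    rw [List.foldl_cons]
    by_cases ha : PySem.Chars.isalpha c = true
    · have hk : keepChar c = true := by simp [keepChar, ha]
      have hcs : ¬ c = ' ' := isalpha_ne_space ha
      rw [show stepB (words, cur) c = (words, cur ++ [c]) by simp [stepB, ha]]
      rw [ih words (cur ++ [c])]
      simp [hk, splitSp, hcs]
    · by_cases hs : c = ' '
      · subst hs
        by_cases hc : cur = []
        · subst hc
          rw [show stepB (words, []) ' ' = (words, []) from by simp [stepB, ha]]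
          rw [ih words []]
          simp [keepChar, splitSp]
        · rw [show stepB (words, cur) ' ' = (words ++ [cur], []) by
              simp [stepB, ha, hc]]
          rw [ih (words ++ [cur]) []]
          simp [List.filter_cons, keepChar, splitSp, hc]
      · have hk : keepChar c = false := by simp [keepChar, ha, hs]
        rw [show stepB (words, cur) c = (words, cur) by simp [stepB, ha, hs]]
        rw [ih words cur]
        simp [List.filter_cons, hk]

-- per-text equality of the two pipelines
theorem per_text_eq (m : List Char) :
    (let new_text := m.foldl (fun nt symbol =>
        if PySem.Chars.isalpha symbol || symbol == ' ' then nt ++ [symbol] else nt) []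
     let new_text := PySem.Chars.lower new_text
     let corpus1 := PySem.Chars.splitOn new_text [' ']
     corpus1.foldl (fun corpus word => if word != [] then corpus ++ [word] else corpus) [])
    = (let t := PySem.Chars.lower m
       let st := t.foldl (fun (st : List (List Char) × List Char) ch =>
         if PySem.Chars.isalpha ch then (st.1, st.2 ++ [ch])
         else if ch == ' ' then (if st.2 != [] then (st.1 ++ [st.2], []) else st)
         else st) ([], [])
       if st.2 != [] then st.1 ++ [st.2] else st.1) := by
  show _ = flushB ((PySem.Chars.lower m).foldl stepB ([], []))
  rw [machine_spec (PySem.Chars.lower m) [] []]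
  simp only
  have hfa : (m.foldl (fun nt symbol =>
      if PySem.Chars.isalpha symbol || symbol == ' ' then nt ++ [symbol] else nt) [])
      = m.filter keepChar := by
    have h := PySem.List.foldl_append_if keepChar id m []
    simpa [keepChar, id] using h
  rw [hfa, splitOn_space]
  have h2 := PySem.List.foldl_append_if (fun w : List Char => w != []) id
    ((splitSp (PySem.Chars.lower (m.filter keepChar))).1 :: (splitSp (PySem.Chars.lower (m.filter keepChar))).2) []
  simp only [id, List.nil_append, List.map_id] at h2
  rw [h2, filter_keep_lower]
  simp

theorem clean_tokenize_corpus_spec : Claim_equal_clean_tokenize_corpus := by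
  intro texts _
  unfold Spec_clean_tokenize_corpus clean_tokenize_corpus clean_tokenize_corpus_alt
  by_cases h : texts = []
  · simp [h]
  · rw [if_neg h, if_neg h]
    rw [PySem.List.foldl_append_singleton_eq_map, PySem.List.foldl_append_singleton_eq_map]
    simp only [List.nil_append]
    apply List.map_congr_left
    intro t _
    congr 1
    exact per_text_eq (brFix (t.toList.length + 1) t.toList)
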